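-- pv_equiv track=rewrite | github.com/j-tyler/api-parity | tests/test_link_field_extraction.py | filter_parent_pointers
-- ===== SOURCE A (Python) =====
-- def filter_parent_pointers(pointers: set[str]) -> list[str]:
--     """Filter out pointers that are prefixes of longer pointers.
--
--     This mirrors the filtering logic in CaseGenerator._generate_synthetic_body().
--     Parent pointers are filtered because setting a value at a parent pointer
--     would overwrite the structure needed for child pointers.
--
--     Example: If we have both "entries/0" and "entries/0/assetTerm", we should
--     only process "entries/0/assetTerm" - the parent "entries/0" would be
--     created as an intermediate dict anyway.
--     """
--     sorted_pointers = sorted(pointers, key=len, reverse=True)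
--     filtered = []
--     for ptr in sorted_pointers:
--         is_prefix = any(
--             other.startswith(ptr + "/")
--             for other in sorted_pointers if len(other) > len(ptr)
--         )
--         if not is_prefix:
--             filtered.append(ptr)
--     return filtered
-- ===== SOURCE B (Python) =====
-- def filter_parent_pointers(pointers: set[str]) -> list[str]:
--     """Collect every proper '/'-prefix of every pointer in one linear pass,
--     then keep the pointers that are not in that prefix set."""
--     prefixes = set()
--     for ptr in pointers:
--         for i, ch in enumerate(ptr):
--             if ch == "/":
--                 prefixes.add(ptr[:i])
--     return [p for p in sorted(pointers, key=len, reverse=True) if p not in prefixes]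
-- ===== Notes on version B (the rewrite author's own statement) =====
-- stated objective: faster
-- what changed: Instead of testing every pointer against every longer pointer with startswith (nested scans), B makes one pass collecting every proper '/'-prefix of every pointer into a hash set and then keeps exactly the pointers not in that set.
import Mathlib
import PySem

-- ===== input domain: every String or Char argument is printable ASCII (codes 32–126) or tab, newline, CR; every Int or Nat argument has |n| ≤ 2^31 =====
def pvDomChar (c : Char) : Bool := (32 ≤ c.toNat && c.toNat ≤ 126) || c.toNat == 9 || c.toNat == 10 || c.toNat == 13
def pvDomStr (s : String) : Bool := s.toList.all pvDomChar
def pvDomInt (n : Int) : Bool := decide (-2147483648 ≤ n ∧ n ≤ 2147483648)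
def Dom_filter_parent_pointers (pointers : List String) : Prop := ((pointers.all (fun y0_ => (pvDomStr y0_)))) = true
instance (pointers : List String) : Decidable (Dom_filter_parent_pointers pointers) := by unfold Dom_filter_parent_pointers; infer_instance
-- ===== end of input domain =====

-- B replaces A's quadratic all-pairs startswith scan by one pass that collects every
-- proper '/'-prefix of every pointer into a set and then filters by set membership.


-- ===== PORT A =====
def filter_parent_pointers (pointers : List String) : List String :=
  let sorted_pointers := PySem.List.sorted pointers (fun s => PySem.Str.len s) true
  sorted_pointers.foldl
    (fun filtered ptr =>
      let is_prefix := sorted_pointers.any (fun other =>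
        decide (PySem.Str.len ptr < PySem.Str.len other) &&
          PySem.Chars.startswith other.toList (ptr.toList ++ ['/']))
      if !is_prefix then filtered ++ [ptr] else filtered)
    []

-- ===== PORT B =====
-- the set of all proper '/'-prefixes: ptr[:i] for each ptr and each i with ptr[i] = '/'
def pvPrefixes (pointers : List String) : PySem.Set (List Char) :=
  pointers.foldl
    (fun s ptr =>
      (PySem.List.enumerate ptr.toList).foldl
        (fun s2 ic =>
          if ic.2 = '/' then PySem.Set.add s2 (PySem.List.slice ptr.toList none (some ic.1)) else s2)
        s)
    PySem.Set.empty

def filter_parent_pointers_alt (pointers : List String) : List String :=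
  let prefixes := pvPrefixes pointers
  (PySem.List.sorted pointers (fun s => PySem.Str.len s) true).filter
    (fun p => !(PySem.Set.contains prefixes p.toList))

-- ===== PRECONDITION & SPEC =====
def Spec_filter_parent_pointers (pointers : List String) (out : List String) : Prop := out = filter_parent_pointers_alt pointers
instance (pointers : List String) (out : List String) : Decidable (Spec_filter_parent_pointers pointers out) := by unfold Spec_filter_parent_pointers; infer_instance

-- ===== CLAIM (what is proved, stated in full; the proofs are below) =====
def Claim_equal_filter_parent_pointers : Prop := ∀ (pointers : List String), Dom_filter_parent_pointers pointers → Spec_filter_parent_pointers pointers (filter_parent_pointers pointers)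

-- ===== LEMMAS AND PROOFS =====

-- 'ptr is a parent': some pointer extends it past a '/'
def pvIsParent (pointers : List String) (ptr : String) : Prop :=
  ∃ q ∈ pointers, (ptr.toList ++ ['/']) <+: q.toList

-- membership in an 'if … then add' fold
theorem pv_mem_foldl_add_ite {β α : Type} [BEq α] [LawfulBEq α]
    (l : List β) (p : β → Prop) [DecidablePred p] (f : β → α) (s0 : PySem.Set α) (x : α) :
    x ∈ l.foldl (fun s b => if p b then PySem.Set.add s (f b) else s) s0 ↔
      x ∈ s0 ∨ ∃ b ∈ l, p b ∧ x = f b := by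
  induction l generalizing s0 with
  | nil => simp
  | cons b t ih =>
    simp only [List.foldl_cons]
    by_cases hb : p b
    · simp [hb, ih, PySem.Set.mem_add]
      tauto
    · simp [hb, ih]

theorem pv_mem_pvPrefixes_aux (ps : List String) (s0 : PySem.Set (List Char)) (x : List Char) :
    x ∈ ps.foldl
      (fun s ptr =>
        (PySem.List.enumerate ptr.toList).foldl
          (fun s2 ic =>
            if ic.2 = '/' then PySem.Set.add s2 (PySem.List.slice ptr.toList none (some ic.1)) else s2)
          s)
      s0 ↔
      x ∈ s0 ∨ ∃ q ∈ ps, ∃ i : Nat,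
        q.toList[i]? = some '/' ∧ x = q.toList.take i := by
  induction ps generalizing s0 with
  | nil => simp
  | cons q t ih =>
    simp only [List.foldl_cons, ih]
    rw [pv_mem_foldl_add_ite (PySem.List.enumerate q.toList)
          (fun ic => ic.2 = '/') (fun ic => PySem.List.slice q.toList none (some ic.1)) s0 x]
    constructor
    · rintro ((hx | ⟨b, hb, hsl, hx⟩) | ⟨r, hr, hrest⟩)
      · exact Or.inl hx
      · rcases (PySem.List.mem_enumerate_iff _ _ _).1 hb with ⟨k, hk, rfl⟩
        refine Or.inr ⟨q, by simp, k, ?_, ?_⟩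
        · rw [List.getElem?_eq_getElem hk]
          simpa using hsl
        · rw [hx]
          simp only [zero_add]
          rw [PySem.List.slice_to q.toList (by positivity)]
          simp
      · exact Or.inr ⟨r, by simp [hr], hrest⟩
    · rintro (hx | ⟨r, hr, i, hsl, hx⟩)
      · exact Or.inl (Or.inl hx)
      · rcases List.getElem?_eq_some_iff.1 hsl with ⟨hi, hget⟩
        rcases List.mem_cons.1 hr with rfl | hr
        · refine Or.inl (Or.inr ⟨((i : Int), r.toList[i]), ?_, by simpa using hget, ?_⟩)
          · exact (PySem.List.mem_enumerate_iff _ _ _).2 ⟨i, hi, by simp⟩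
          · rw [hx]
            rw [PySem.List.slice_to r.toList (by positivity)]
            simp
        · refine Or.inr ⟨r, hr, i, hsl, hx⟩

theorem pv_mem_pvPrefixes (pointers : List String) (x : List Char) :
    x ∈ pvPrefixes pointers ↔
      ∃ q ∈ pointers, ∃ i : Nat,
        q.toList[i]? = some '/' ∧ x = q.toList.take i := by
  unfold pvPrefixes
  rw [pv_mem_pvPrefixes_aux]
  simp [PySem.Set.empty]

-- the take/getElem characterisation equals the startswith characterisation
theorem pv_prefix_iff (pointers : List String) (ptr : String) :
    (∃ q ∈ pointers, ∃ i : Nat,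
        q.toList[i]? = some '/' ∧ ptr.toList = q.toList.take i) ↔ pvIsParent pointers ptr := by
  constructor
  · rintro ⟨q, hq, i, hsl, hx⟩
    rcases List.getElem?_eq_some_iff.1 hsl with ⟨hi, hget⟩
    refine ⟨q, hq, q.toList.drop (i + 1), ?_⟩
    rw [hx]
    conv_rhs => rw [← List.take_append_drop i q.toList]
    rw [List.append_assoc]
    congr 1
    rw [List.drop_eq_getElem_cons hi, hget]
    simp
  · rintro ⟨q, hq, rest, hrest⟩
    refine ⟨q, hq, ptr.toList.length, ?_, ?_⟩
    · simp [← hrest]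
    · simp [← hrest]

-- A's inner any ⇔ pvIsParent (the length guard is implied by the prefix)
theorem pv_any_iff (pointers : List String) (ptr : String) :
    ((PySem.List.sorted pointers (fun s => PySem.Str.len s) true).any (fun other =>
        decide (PySem.Str.len ptr < PySem.Str.len other) &&
          PySem.Chars.startswith other.toList (ptr.toList ++ ['/'])) = true) ↔
      pvIsParent pointers ptr := by
  rw [List.any_eq_true]
  constructor
  · rintro ⟨other, hmem, h⟩
    rw [Bool.and_eq_true, decide_eq_true_iff] at h
    refine ⟨other, (PySem.List.mem_sorted _ _ _ _).1 hmem, ?_⟩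
    have := h.2
    simpa [PySem.Chars.startswith, List.isPrefixOf_iff_prefix] using this
  · rintro ⟨q, hq, hpre⟩
    refine ⟨q, (PySem.List.mem_sorted _ _ _ _).2 hq, ?_⟩
    rw [Bool.and_eq_true, decide_eq_true_iff]
    constructor
    · have hlen := hpre.length_le
      simp only [List.length_append, List.length_cons, List.length_nil] at hlen
      rw [PySem.Str.len_eq, PySem.Str.len_eq]
      omega
    · simpa [PySem.Chars.startswith, List.isPrefixOf_iff_prefix] using hpre

theorem pv_tests_agree (pointers : List String) (ptr : String) :
    (!(PySem.List.sorted pointers (fun s => PySem.Str.len s) true).any (fun other =>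
        decide (PySem.Str.len ptr < PySem.Str.len other) &&
          PySem.Chars.startswith other.toList (ptr.toList ++ ['/']))) =
      (!(PySem.Set.contains (pvPrefixes pointers) ptr.toList)) := by
  congr 1
  rw [Bool.eq_iff_iff, pv_any_iff, PySem.Set.contains_iff, pv_mem_pvPrefixes]
  exact (pv_prefix_iff pointers ptr).symm

-- ===== VERDICT (by name: the statement is the Claim_ definition above) =====
theorem filter_parent_pointers_spec : Claim_equal_filter_parent_pointers := by
  intro pointers _
  unfold Spec_filter_parent_pointers filter_parent_pointers filter_parent_pointers_alt
  simp only []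
  rw [PySem.List.foldl_append_if_eq_filter
        (fun ptr => !(PySem.List.sorted pointers (fun s => PySem.Str.len s) true).any (fun other =>
          decide (PySem.Str.len ptr < PySem.Str.len other) &&
            PySem.Chars.startswith other.toList (ptr.toList ++ ['/'])))]
  rw [List.nil_append]
  exact List.filter_congr (fun ptr _ => pv_tests_agree pointers ptr)
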